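-- pv_equiv track=rewrite | github.com/bivguy/ReadMapper | backend/mapper/index/fm_index.py | _build_C
-- ===== SOURCE A (Python) =====
-- from collections import defaultdict
-- from typing import Dict, List, Tuple
--
-- def _build_C(bwt: str) -> Dict[str, int]:
--     counts = defaultdict(int)
--     for ch in bwt:
--         counts[ch] += 1
--     total = 0
--     C = {}
--     for ch in sorted(counts):
--         C[ch] = total
--         total += counts[ch]
--     return C
-- ===== SOURCE B (Python) =====
-- def _build_C(bwt: str):
--     C = {}
--     for i, ch in enumerate(sorted(bwt)):
--         if ch not in C:
--             C[ch] = i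
--     return C
-- ===== Notes on version B (the rewrite author's own statement) =====
-- stated objective: simpler
-- what changed: Replaces the count-then-cumulative-sum over a counting dict by sorting the whole BWT and recording each character's first-occurrence index in the sorted string, which equals its cumulative offset.
import Mathlib
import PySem

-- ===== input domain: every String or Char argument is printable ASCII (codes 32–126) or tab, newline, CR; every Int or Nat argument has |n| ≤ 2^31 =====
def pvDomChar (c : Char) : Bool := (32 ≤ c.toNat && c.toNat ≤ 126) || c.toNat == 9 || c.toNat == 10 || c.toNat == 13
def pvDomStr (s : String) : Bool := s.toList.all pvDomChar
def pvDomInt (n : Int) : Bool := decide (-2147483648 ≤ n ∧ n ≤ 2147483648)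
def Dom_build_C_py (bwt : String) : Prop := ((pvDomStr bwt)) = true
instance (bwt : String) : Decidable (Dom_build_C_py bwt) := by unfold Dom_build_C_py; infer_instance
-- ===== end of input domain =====

-- B replaces A's count-then-cumsum by sorting the whole BWT and taking first-occurrence
-- indices in the sorted string (objective: simpler).

-- ===== PORT A =====
-- dict keys are single-character strings; the ports carry them as Char and wrap to String on return
def build_C_py (bwt : String) : List (String × Int) :=
  let counts : PySem.Dict Char Int :=
    bwt.toList.foldl (fun d ch => d.modify ch 0 (· + 1)) PySem.Dict.empty
  let st :=
    (PySem.List.sorted counts.keys (fun x => x) false).foldl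
      (fun (st : Int × PySem.Dict Char Int) ch =>
        (st.1 + counts.getD ch 0, st.2.insert ch st.1))
      (0, PySem.Dict.empty)
  st.2.items.map (fun p => (String.ofList [p.1], p.2))

-- ===== PORT B =====
def build_C_py_alt (bwt : String) : List (String × Int) :=
  let s := PySem.List.sorted bwt.toList (fun x => x) false
  let C : PySem.Dict Char Int :=
    (PySem.List.enumerate s).foldl
      (fun d p => if d.contains p.2 then d else d.insert p.2 p.1)
      PySem.Dict.empty
  C.items.map (fun p => (String.ofList [p.1], p.2))

-- ===== PRECONDITION & SPEC =====
def Spec_build_C_py (bwt : String) (out : List (String × Int)) : Prop := out = build_C_py_alt bwt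
instance (bwt : String) (out : List (String × Int)) : Decidable (Spec_build_C_py bwt out) := by unfold Spec_build_C_py; infer_instance

-- ===== CLAIM (what is proved, stated in full; the proofs are below) =====
def Claim_equal_build_C_py : Prop := ∀ (bwt : String), Dom_build_C_py bwt → Spec_build_C_py bwt (build_C_py bwt)

-- ===== LEMMAS AND PROOFS =====

/-- The (char, running-offset) pairs both loops produce over the strictly sorted key list. -/
def pvScan (f : Char → Int) : List Char → Int → List (Char × Int)
  | [], _ => []
  | c :: ks, t => (c, t) :: pvScan f ks (t + f c)

lemma pv_foldA (f : Char → Int) :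
    ∀ (ks : List Char) (t : Int) (d : PySem.Dict Char Int),
      ks.Nodup → (∀ c ∈ ks, d.contains c = false) →
      ((ks.foldl (fun (st : Int × PySem.Dict Char Int) ch =>
          (st.1 + f ch, st.2.insert ch st.1)) (t, d)).2).items
        = d.items ++ pvScan f ks t := by
  intro ks
  induction ks with
  | nil => intro t d _ _; simp [pvScan]
  | cons c ks ih =>
    intro t d hnd hfresh
    rcases List.nodup_cons.mp hnd with ⟨hc, hnd'⟩
    have hdc : d.contains c = false := hfresh c (List.mem_cons_self ..)
    simp only [List.foldl_cons]
    rw [ih (t + f c) (d.insert c t) hnd' ?_]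
    · rw [PySem.Dict.items_insert_of_not_contains d t hdc]
      simp [pvScan]
    · intro c' hc'
      rw [PySem.Dict.contains_insert]
      have : c' ≠ c := fun h => hc (h ▸ hc')
      simp [this, hfresh c' (List.mem_cons_of_mem _ hc')]


lemma pv_skip (c : Char) : ∀ (n : Nat) (rest : List Char) (i : Int) (d : PySem.Dict Char Int),
    d.contains c = true →
    (PySem.List.enumerate (List.replicate n c ++ rest) i).foldl
        (fun d p => if d.contains p.2 then d else d.insert p.2 p.1) d
      = (PySem.List.enumerate rest (i + n)).foldl
        (fun d p => if d.contains p.2 then d else d.insert p.2 p.1) d := by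
  intro n
  induction n with
  | zero => intro rest i d _; simp
  | succ m ih =>
    intro rest i d hd
    rw [List.replicate_succ, List.cons_append, PySem.List.enumerate_cons, List.foldl_cons]
    simp only [hd, if_pos]
    rw [ih rest (i + 1) d hd]
    congr 1
    push_cast
    ring_nf


lemma pv_foldB (n : Char → Nat) :
    ∀ (ks : List Char) (i : Int) (d : PySem.Dict Char Int),
      ks.Nodup → (∀ c ∈ ks, d.contains c = false) → (∀ c ∈ ks, 1 ≤ n c) →
      ((PySem.List.enumerate (ks.flatMap (fun c => List.replicate (n c) c)) i).foldl
          (fun d p => if d.contains p.2 then d else d.insert p.2 p.1) d).items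
        = d.items ++ pvScan (fun c => (n c : Int)) ks i := by
  intro ks
  induction ks with
  | nil => intro i d _ _ _; simp [pvScan]
  | cons c ks ih =>
    intro i d hnd hfresh hpos
    rcases List.nodup_cons.mp hnd with ⟨hc, hnd'⟩
    have hdc : d.contains c = false := hfresh c (List.mem_cons_self ..)
    obtain ⟨m, hm⟩ : ∃ m, n c = m + 1 :=
      ⟨n c - 1, by have := hpos c (List.mem_cons_self ..); omega⟩
    rw [List.flatMap_cons, hm, List.replicate_succ, List.cons_append,
      PySem.List.enumerate_cons, List.foldl_cons]
    simp only [hdc, Bool.false_eq_true, if_false]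
    rw [pv_skip c m _ (i + 1) _ (PySem.Dict.contains_insert_self d c i)]
    rw [ih (i + 1 + m) (d.insert c i) hnd' ?_ (fun c' h => hpos c' (List.mem_cons_of_mem _ h))]
    · rw [PySem.Dict.items_insert_of_not_contains d i hdc]
      simp only [pvScan, hm]
      have : i + 1 + (m : Int) = i + ((m : Int) + 1) := by ring
      rw [this]
      push_cast
      simp
    · intro c' hc'
      rw [PySem.Dict.contains_insert]
      have : c' ≠ c := fun h => hc (h ▸ hc')
      simp [this, hfresh c' (List.mem_cons_of_mem _ hc')]


/-- The strictly increasing list of the distinct characters of `l`. -/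
def pvKeys (l : List Char) : List Char :=
  PySem.List.sorted (PySem.Set.ofList l) (fun x => x) false

lemma pv_keys_pairwise (l : List Char) : (pvKeys l).Pairwise (· < ·) := by
  unfold pvKeys
  exact PySem.List.sorted_ofList_pairwise_lt (xs := l)


lemma pv_keys_nodup (l : List Char) : (pvKeys l).Nodup := by
  exact (pv_keys_pairwise l).imp fun h => ne_of_lt h


lemma pv_mem_keys (l : List Char) (x : Char) : x ∈ pvKeys l ↔ x ∈ l := by
  unfold pvKeys
  rw [PySem.List.mem_sorted, PySem.Set.mem_ofList]


lemma pv_count_flatMap (n : Char → Nat) :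
    ∀ (ks : List Char), ks.Nodup → ∀ x,
      (ks.flatMap (fun c => List.replicate (n c) c)).count x = if x ∈ ks then n x else 0 := by
  intro ks
  induction ks with
  | nil => intro _ x; simp
  | cons c ks ih =>
    intro hnd x
    rcases List.nodup_cons.mp hnd with ⟨hc, hnd'⟩
    simp only [List.flatMap_cons, List.count_append, ih hnd' x, List.count_replicate,
      List.mem_cons]
    by_cases hx : x = c
    · subst hx; simp [hc]
    · simp [hx]
      intro h; exact absurd h.symm hx


lemma pv_flatMap_perm (l : List Char) :
    ((pvKeys l).flatMap (fun c => List.replicate (l.count c) c)).Perm l := by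
  rw [List.perm_iff_count]
  intro x
  rw [pv_count_flatMap (fun c => l.count c) (pvKeys l) (pv_keys_nodup l) x]
  by_cases hx : x ∈ pvKeys l
  · simp [hx]
  · have hxl : x ∉ l := fun h => hx ((pv_mem_keys l x).mpr h)
    simp [hx, List.count_eq_zero_of_not_mem hxl]


lemma pv_flatMap_pairwise (n : Char → Nat) :
    ∀ (ks : List Char), ks.Pairwise (· < ·) →
      (ks.flatMap (fun c => List.replicate (n c) c)).Pairwise (· ≤ ·) := by
  intro ks
  induction ks with
  | nil => intro _; simp
  | cons c ks ih =>
    intro hp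
    rcases List.pairwise_cons.mp hp with ⟨hlt, hp'⟩
    simp only [List.flatMap_cons]
    apply List.pairwise_append.mpr
    refine ⟨?_, ih hp', ?_⟩
    · exact List.pairwise_replicate.mpr (Or.inr (le_refl c))
    · intro x hx y hy
      have hxc : x = c := List.eq_of_mem_replicate hx
      rcases List.mem_flatMap.mp hy with ⟨c', hc', hy'⟩
      have hyc : y = c' := List.eq_of_mem_replicate hy'
      subst hxc; subst hyc
      exact le_of_lt (hlt _ hc')


lemma pv_sorted_eq (l : List Char) :
    PySem.List.sorted l (fun x => x) false
      = (pvKeys l).flatMap (fun c => List.replicate (l.count c) c) := by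
  exact PySem.List.sorted_id_eq_of_perm_of_pairwise _ _
    (pv_flatMap_perm l) (pv_flatMap_pairwise (fun c => l.count c) (pvKeys l) (pv_keys_pairwise l))


-- ===== VERDICT (by name: the statement is the Claim_ definition above) =====
theorem build_C_py_spec : Claim_equal_build_C_py := by
  intro bwt _
  show build_C_py bwt = build_C_py_alt bwt
  unfold build_C_py build_C_py_alt
  simp only
  rw [← PySem.Dict.counter_eq_foldl, PySem.Dict.keys_counter,
    show PySem.List.sorted (PySem.Set.ofList bwt.toList) (fun x => x) false
      = pvKeys bwt.toList from rfl, pv_sorted_eq bwt.toList]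
  rw [pv_foldA (fun ch => (PySem.Dict.counter bwt.toList).getD ch 0) (pvKeys bwt.toList) 0
        PySem.Dict.empty (pv_keys_nodup _) (fun c _ => PySem.Dict.contains_empty ..)]
  rw [pv_foldB (fun c => bwt.toList.count c) (pvKeys bwt.toList) 0 PySem.Dict.empty
        (pv_keys_nodup _) (fun c _ => PySem.Dict.contains_empty ..)
        (fun c hc => List.count_pos_iff.mpr ((pv_mem_keys _ c).mp hc))]
  have hf : (fun ch => (PySem.Dict.counter bwt.toList).getD ch 0)
      = fun c => (bwt.toList.count c : Int) :=
    funext fun c => PySem.Dict.getD_counter _ c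
  rw [hf]
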